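-- pv_equiv track=rewrite | github.com/xkhanhnguyen/codesignal-arcade | Intro/Eruption of Light/45_buildPalindrome.py | solution
-- ===== SOURCE A (Python) =====
-- def solution(st):
--     if st == st[::-1]:
--         return st
--     index = 0
--     substring = st[index:]
--     while substring != substring[::-1]:
--         index += 1
--         substring = st[index:]
--
--     return st + st[index -1::-1]
-- ===== SOURCE B (Python) =====
-- def solution(st):
--     # Encode each suffix st[i:] and its reverse as integers in base 1114112
--     # (larger than any Unicode code point, so the encoding is injective);
--     # st[i:] is a palindrome exactly when the two numbers are equal.
--     n = len(st)
--     B = 1114112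
--     F = [0] * (n + 1)  # F[i] = base-B value of st[i:]
--     R = [0] * (n + 1)  # R[i] = base-B value of st[i:][::-1]
--     p = 1
--     for i in range(n - 1, -1, -1):
--         c = ord(st[i])
--         F[i] = c * p + F[i + 1]
--         R[i] = R[i + 1] * B + c
--         p *= B
--     i = 0
--     while F[i] != R[i]:
--         i += 1
--     return st + st[:i][::-1]
-- ===== Notes on version B (the rewrite author's own statement) =====
-- stated objective: alternative
-- what changed: B replaces A's loop that re-reverses every suffix with a numeric encoding: one right-to-left pass turns every suffix and its reverse into base-1114112 integers, then a scan for the first equal pair finds the longest palindromic suffix; no speed is claimed.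
import Mathlib
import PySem

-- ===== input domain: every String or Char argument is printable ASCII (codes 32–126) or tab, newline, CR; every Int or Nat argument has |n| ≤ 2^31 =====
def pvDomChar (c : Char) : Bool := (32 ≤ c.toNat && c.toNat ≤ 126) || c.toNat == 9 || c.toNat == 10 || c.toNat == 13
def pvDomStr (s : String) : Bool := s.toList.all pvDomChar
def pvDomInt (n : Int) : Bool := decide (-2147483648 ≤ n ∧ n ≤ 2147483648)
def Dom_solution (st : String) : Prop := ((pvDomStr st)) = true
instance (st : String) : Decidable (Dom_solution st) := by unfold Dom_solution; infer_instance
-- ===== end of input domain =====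

-- B re-implements A's "append reversed prefix to make a palindrome" by encoding suffixes as
-- base-1114112 integers in one right-to-left pass instead of A's re-reversing of every suffix;
-- same value everywhere, no speed claim.

-- ===== PORT A =====
-- while loop: index increases while st[index:] is not a palindrome
def solutionLoop (s : List Char) (index : Nat) : Nat :=
  if s.drop index = (s.drop index).reverse then index
  else solutionLoop s (index + 1)
termination_by s.length - index
decreasing_by
  have hi : index < s.length := by
    by_contra hge
    have : s.drop index = [] := List.drop_eq_nil_of_le (by omega)
    simp [this] at *
  omega

def solution (st : String) : String :=
  let l := st.toList
  -- if st == st[::-1]: return st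
  if l = l.reverse then st
  else
    -- index = 0; substring = st[index:]; while substring != substring[::-1]: …
    let index := solutionLoop l 0
    -- return st + st[index-1::-1]   (step -1 ≠ 0, so slice? is always some; getD is never the default)
    st ++ String.ofList ((PySem.List.slice? l (some ((index : Int) - 1)) none (-1)).getD [])

-- ===== PORT B =====
-- right-to-left pass building F[i] = value of st[i:], R[i] = value of st[i:][::-1], p = 1114112^(chars processed)
def pvBuild : List Char → List Int × List Int × Int
  | [] => ([0], [0], 1)
  | c :: rest =>
    let r := pvBuild rest
    (((c.toNat : Int) * r.2.2 + r.1.headI) :: r.1,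
     (r.2.1.headI * 1114112 + (c.toNat : Int)) :: r.2.1,
     r.2.2 * 1114112)

-- i = 0; while F[i] != R[i]: i += 1   (the last entries are both 0, so it stops)
def pvScan : List Int → List Int → Nat
  | a :: as, b :: bs => if a = b then 0 else pvScan as bs + 1
  | _, _ => 0

def solution_alt (st : String) : String :=
  let l := st.toList
  let r := pvBuild l
  let i := pvScan r.1 r.2.1
  -- return st + st[:i][::-1]
  st ++ String.ofList ((l.take i).reverse)

-- ===== PRECONDITION & SPEC =====
def Spec_solution (st : String) (out : String) : Prop := out = solution_alt st
instance (st : String) (out : String) : Decidable (Spec_solution st out) := by unfold Spec_solution; infer_instance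

-- ===== CLAIM (what is proved, stated in full; the proofs are below) =====
def Claim_equal_solution : Prop := ∀ (st : String), Dom_solution st → Spec_solution st (solution st)

-- ===== LEMMAS AND PROOFS =====

-- first index whose suffix is a palindrome (proof-only reference function)
def pidx (l : List Char) : Nat :=
  if l = l.reverse then 0 else pidx l.tail + 1
termination_by l.length
decreasing_by
  have hl : l ≠ [] := by rintro rfl; simp at *
  have : 1 ≤ l.length := List.length_pos_iff.mpr hl
  have : l.tail.length = l.length - 1 := List.length_tail
  omega

-- base-1114112 value of a list of chars (big-endian)
def pvVal (l : List Char) : Int := l.foldl (fun a c => a * 1114112 + (c.toNat : Int)) 0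

lemma pvFoldl_shift (l : List Char) : ∀ a : Int,
    l.foldl (fun x c => x * 1114112 + (c.toNat : Int)) a = a * 1114112 ^ l.length + pvVal l := by
  induction l with
  | nil => intro a; simp [pvVal]
  | cons c t ih =>
    intro a
    have h0 : pvVal (c :: t) = ((c.toNat : Int)) * 1114112 ^ t.length + pvVal t := by
      simp only [pvVal, List.foldl_cons]
      rw [ih]
      ring_nf
      rfl
    simp only [List.foldl_cons]
    rw [ih, h0]
    simp [List.length_cons, pow_succ]
    ring

lemma pvVal_cons (c : Char) (t : List Char) :
    pvVal (c :: t) = (c.toNat : Int) * 1114112 ^ t.length + pvVal t := by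
  simp only [pvVal, List.foldl_cons]
  rw [pvFoldl_shift]
  ring_nf
  rfl

lemma pvVal_append_singleton (l : List Char) (c : Char) :
    pvVal (l ++ [c]) = pvVal l * 1114112 + (c.toNat : Int) := by
  simp [pvVal, List.foldl_append]

lemma char_toNat_lt (c : Char) : c.toNat < 1114112 := by
  have h := c.valid
  have h2 : c.toNat = c.val.toNat := rfl
  rcases h with h | h
  · omega
  · omega

lemma pvVal_nonneg (l : List Char) : 0 ≤ pvVal l := by
  induction l with
  | nil => simp [pvVal]
  | cons c t ih =>
    rw [pvVal_cons]
    have : (0:Int) ≤ (c.toNat : Int) := by positivity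
    have hp : (0:Int) ≤ 1114112 ^ t.length := by positivity
    nlinarith

lemma pvVal_lt (l : List Char) : pvVal l < 1114112 ^ l.length := by
  induction l with
  | nil => simp [pvVal]
  | cons c t ih =>
    rw [pvVal_cons]
    have hc : (c.toNat : Int) < 1114112 := by exact_mod_cast char_toNat_lt c
    have hp : (0:Int) < 1114112 ^ t.length := by positivity
    have : (c.toNat : Int) * 1114112 ^ t.length ≤ 1114111 * 1114112 ^ t.length := by nlinarith
    calc (c.toNat : Int) * 1114112 ^ t.length + pvVal t
        < (c.toNat : Int) * 1114112 ^ t.length + 1114112 ^ t.length := by omega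
      _ ≤ 1114111 * 1114112 ^ t.length + 1114112 ^ t.length := by omega
      _ = 1114112 ^ (t.length + 1) := by ring
      _ = 1114112 ^ (c :: t).length := by simp

lemma pvVal_inj : ∀ (a b : List Char), a.length = b.length → pvVal a = pvVal b → a = b := by
  intro a
  induction a with
  | nil =>
    intro b hlen _
    cases b with
    | nil => rfl
    | cons _ _ => simp at hlen
  | cons c t ih =>
    intro b hlen hval
    cases b with
    | nil => simp at hlen
    | cons d u =>
      have hl : t.length = u.length := by simpa using hlen
      rw [pvVal_cons, pvVal_cons, hl] at hval
      have h1 := pvVal_nonneg t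
      have h2 := pvVal_lt t
      have h3 := pvVal_nonneg u
      have h4 := pvVal_lt u
      rw [hl] at h2
      have hp : (0:Int) < 1114112 ^ u.length := by positivity
      have hcd : (c.toNat : Int) = (d.toNat : Int) := by
        by_contra hne
        rcases lt_or_gt_of_ne hne with h | h
        · have : (c.toNat : Int) + 1 ≤ (d.toNat : Int) := by omega
          nlinarith
        · have : (d.toNat : Int) + 1 ≤ (c.toNat : Int) := by omega
          nlinarith
      have hc : c = d := by
        have h5 : c.toNat = d.toNat := by exact_mod_cast hcd
        have h6 : c.val = d.val := UInt32.toNat_inj.mp h5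
        exact Char.ext h6
      have hrest : pvVal t = pvVal u := by
        rw [hcd] at hval
        omega
      rw [hc, ih u hl hrest]

lemma pvPal_iff (l : List Char) : pvVal l = pvVal l.reverse ↔ l = l.reverse := by
  constructor
  · intro h
    exact pvVal_inj l l.reverse (by simp) h
  · intro h
    exact congrArg pvVal h

lemma tails_map_headI {β : Type} [Inhabited β] (f : List Char → β) (l : List Char) :
    (l.tails.map f).headI = f l := by
  cases l <;> simp

lemma pvBuild_spec (l : List Char) :
    pvBuild l = (l.tails.map pvVal, l.tails.map (fun t => pvVal t.reverse), 1114112 ^ l.length) := by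
  induction l with
  | nil => simp [pvBuild, pvVal]
  | cons c rest ih =>
    simp only [pvBuild, ih]
    refine Prod.ext ?_ (Prod.ext ?_ ?_)
    · simp only [tails_map_headI, List.tails_cons, List.map_cons]
      rw [pvVal_cons]
    · simp only [tails_map_headI, List.tails_cons, List.map_cons]
      have : pvVal ((c :: rest).reverse) = pvVal rest.reverse * 1114112 + (c.toNat : Int) := by
        rw [List.reverse_cons, pvVal_append_singleton]
      rw [this]
    · rw [List.length_cons, pow_succ]

lemma pidx_eq_zero_iff (l : List Char) : l = l.reverse → pidx l = 0 := by
  intro h; rw [pidx, if_pos h]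

lemma pidx_tail (l : List Char) (h : ¬ l = l.reverse) : pidx l = pidx l.tail + 1 := by
  rw [pidx, if_neg h]

lemma pvScan_spec (l : List Char) :
    pvScan (l.tails.map pvVal) (l.tails.map (fun t => pvVal t.reverse)) = pidx l := by
  induction l with
  | nil => simp [pvScan, pidx, pvVal]
  | cons c rest ih =>
    simp only [List.tails_cons, List.map_cons]
    rw [pvScan]
    by_cases h : (c :: rest) = (c :: rest).reverse
    · rw [if_pos ((pvPal_iff (c :: rest)).mpr h), pidx_eq_zero_iff _ h]
    · rw [if_neg (fun he => h ((pvPal_iff (c :: rest)).mp he)), ih,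
        pidx_tail _ h]
      simp

lemma solutionLoop_spec (s : List Char) : ∀ index : Nat,
    solutionLoop s index = index + pidx (s.drop index) := by
  intro index
  induction index using solutionLoop.induct s with
  | case1 i h =>
    rw [solutionLoop, if_pos h, pidx_eq_zero_iff _ h]
    omega
  | case2 i h ih =>
    rw [solutionLoop, if_neg h, ih, pidx_tail _ h, List.tail_drop]
    omega

lemma pidx_le_aux : ∀ (n : Nat) (l : List Char), l.length ≤ n → pidx l ≤ l.length := by
  intro n
  induction n with
  | zero =>
    intro l hl
    have : l = [] := List.eq_nil_of_length_eq_zero (by omega)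
    subst this
    rw [pidx_eq_zero_iff _ (by simp)]
    simp
  | succ n ih =>
    intro l hl
    by_cases h : l = l.reverse
    · rw [pidx_eq_zero_iff _ h]; omega
    · rw [pidx_tail _ h]
      have hne : l ≠ [] := by rintro rfl; simp at h
      have h1 : 1 ≤ l.length := List.length_pos_iff.mpr hne
      have h2 : l.tail.length = l.length - 1 := List.length_tail
      have := ih l.tail (by omega)
      omega

lemma pidx_le (l : List Char) : pidx l ≤ l.length := pidx_le_aux l.length l le_rfl

lemma pidx_pos (l : List Char) (h : ¬ l = l.reverse) : 1 ≤ pidx l := by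
  rw [pidx_tail _ h]; omega

-- st[k-1::-1] for 1 ≤ k ≤ len is the reverse of the first k characters
lemma slice?_rev_prefix (l : List Char) (k : Nat) (hk1 : 1 ≤ k) (hk2 : k ≤ l.length) :
    PySem.List.slice? l (some ((k : Int) - 1)) none (-1) = some ((l.take k).reverse) := by
  rw [PySem.List.slice?]
  rw [if_neg (by norm_num)]
  have hstart : PySem.List.sliceIndices l.length (some ((k : Int) - 1)) none (-1)
      = ((k : Int) - 1, -1, -1) := by
    rw [PySem.List.sliceIndices]
    simp only
    rw [if_pos (by norm_num : (-1:Int) < 0), if_pos (by norm_num : (-1:Int) < 0),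
      if_pos (by norm_num : (-1:Int) < 0)]
    have h1 : ¬ ((k : Int) - 1 < 0) := by omega
    rw [if_neg h1]
    have h2 : min ((k : Int) - 1) ((l.length : Int) - 1) = (k : Int) - 1 := by
      apply min_eq_left; omega
    rw [h2]
  rw [hstart]
  simp only
  rw [if_neg (by norm_num : ¬ (0:Int) < -1), if_pos (by omega : (-1:Int) < (k : Int) - 1)]
  have hcount : (((k : Int) - 1 - -1 + - -1 - 1) / - -1).toNat = k := by
    norm_num
  rw [hcount]
  congr 1
  have hg : List.filterMap (fun (j : Nat) => l[(((k : Int) - 1) + (-1) * (j : Int)).toNat]?) (List.range k)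
      = (List.range k).map (fun j => l.getD (k - 1 - j) default) := by
    rw [← List.filterMap_eq_map]
    apply List.filterMap_congr
    intro j hj
    have hjk := List.mem_range.mp hj
    have hidx : (((k : Int) - 1) + (-1) * (j : Int)).toNat = k - 1 - j := by omega
    rw [hidx]
    have hb : k - 1 - j < l.length := by omega
    rw [List.getElem?_eq_getElem hb]
    simp [List.getD_eq_getElem?_getD, List.getElem?_eq_getElem hb]
  rw [hg]
  apply List.ext_getElem
  · simp [min_eq_left hk2]
  · intro j hj1 hj2
    have hjk : j < k := by simpa using hj1
    simp only [List.getElem_map, List.getElem_range]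
    have hb : k - 1 - j < l.length := by omega
    rw [List.getD_eq_getElem?_getD, List.getElem?_eq_getElem hb]
    rw [List.getElem_reverse, List.getElem_take]
    simp only [Option.getD_some]
    congr 1
    have : (List.take k l).length = k := by simp [min_eq_left hk2]
    omega

-- ===== VERDICT (by name: the statement is the Claim_ definition above) =====
theorem solution_spec : Claim_equal_solution := by
  intro st _
  unfold Spec_solution solution solution_alt
  simp only
  rw [pvBuild_spec, pvScan_spec]
  by_cases h : st.toList = st.toList.reverse
  · rw [if_pos h, pidx_eq_zero_iff _ h]
    simp
  · rw [if_neg h, solutionLoop_spec, List.drop_zero]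
    simp only [Nat.zero_add]
    have h1 := pidx_pos st.toList h
    have h2 := pidx_le st.toList
    rw [slice?_rev_prefix st.toList (pidx st.toList) h1 h2]
    simp
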